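-- pv_equiv track=rewrite | github.com/usagi917/keiba | races/hanshin-daishoten-2026-03-22/refresh_race_data.py | compute_draw
-- ===== SOURCE A (Python) =====
-- def compute_draw(field_size: int, horse_number: int) -> str:
--     if field_size <= 0 or horse_number <= 0:
--         return ""
--     if field_size <= 8:
--         return str(horse_number)
--     if field_size <= 16:
--         single_brackets = 16 - field_size
--         bracket_sizes = [1] * single_brackets + [2] * (8 - single_brackets)
--     else:
--         triple_brackets = field_size - 16
--         bracket_sizes = [2] * (8 - triple_brackets) + [3] * triple_brackets
--     total = 0
--     for idx, size in enumerate(bracket_sizes, start=1):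
--         total += size
--         if horse_number <= total:
--             return str(idx)
--     return str(min(8, horse_number))
-- ===== SOURCE B (Python) =====
-- def compute_draw(field_size: int, horse_number: int) -> str:
--     if field_size <= 0 or horse_number <= 0:
--         return ""
--     if field_size <= 8:
--         return str(horse_number)
--     if field_size <= 16:
--         single = 16 - field_size
--         if horse_number <= single:
--             return str(horse_number)
--         if horse_number <= field_size:
--             return str(single + -(-(horse_number - single) // 2))
--         return "8"
--     triple = field_size - 16
--     doubles = max(0, 8 - triple)
--     boundary = 2 * doubles
--     if horse_number <= boundary:
--         return str(-(-horse_number // 2))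
--     if horse_number <= boundary + 3 * triple:
--         return str(doubles + -(-(horse_number - boundary) // 3))
--     return "8"
-- ===== Notes on version B (the rewrite author's own statement) =====
-- stated objective: faster
-- what changed: Replaces building the bracket_sizes list and scanning it with an accumulator by direct ceiling-division arithmetic on the bracket boundaries.
import Mathlib
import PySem

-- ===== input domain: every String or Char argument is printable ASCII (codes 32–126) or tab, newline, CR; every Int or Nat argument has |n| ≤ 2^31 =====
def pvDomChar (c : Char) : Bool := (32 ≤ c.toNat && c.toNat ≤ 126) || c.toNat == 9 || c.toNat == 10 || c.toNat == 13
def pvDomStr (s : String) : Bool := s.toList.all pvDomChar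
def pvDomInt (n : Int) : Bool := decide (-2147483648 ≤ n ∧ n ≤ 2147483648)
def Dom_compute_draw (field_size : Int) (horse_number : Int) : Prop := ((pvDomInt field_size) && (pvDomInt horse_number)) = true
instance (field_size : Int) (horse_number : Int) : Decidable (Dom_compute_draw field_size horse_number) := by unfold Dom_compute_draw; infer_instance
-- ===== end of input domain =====

-- B replaces A's bracket-size list building + accumulating scan with direct ceiling-division
-- arithmetic on the bracket boundaries (faster: O(1) vs O(field_size)).


-- ===== PORT A =====
-- the 'for idx, size in enumerate(bracket_sizes, start=1)' loop with accumulator 'total';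
-- 'some idx' models the early 'return str(idx)', 'none' models falling off the loop
def computeDrawLoop (horse_number : Int) : List Int → Int → Int → Option Int
  | [], _, _ => none
  | size :: rest, idx, total =>
    let t := total + size
    if horse_number ≤ t then some idx else computeDrawLoop horse_number rest (idx + 1) t

def compute_draw (field_size : Int) (horse_number : Int) : String :=
  if field_size ≤ 0 ∨ horse_number ≤ 0 then ""
  else if field_size ≤ 8 then PySem.Int.toStr horse_number
  else
    -- '[x] * n' is List.replicate n.toNat x (Python's list repetition: empty for n ≤ 0 — exact)
    let bracket_sizes : List Int :=
      if field_size ≤ 16 then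
        let single_brackets := 16 - field_size
        List.replicate single_brackets.toNat 1 ++ List.replicate (8 - single_brackets).toNat 2
      else
        let triple_brackets := field_size - 16
        List.replicate (8 - triple_brackets).toNat 2 ++ List.replicate triple_brackets.toNat 3
    match computeDrawLoop horse_number bracket_sizes 1 0 with
    | some idx => PySem.Int.toStr idx
    | none => PySem.Int.toStr (min 8 horse_number)

-- ===== PORT B =====
def compute_draw_alt (field_size : Int) (horse_number : Int) : String :=
  if field_size ≤ 0 ∨ horse_number ≤ 0 then ""
  else if field_size ≤ 8 then PySem.Int.toStr horse_number
  else if field_size ≤ 16 then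
    let single := 16 - field_size
    if horse_number ≤ single then PySem.Int.toStr horse_number
    else if horse_number ≤ field_size then
      PySem.Int.toStr (single + -(PySem.Int.floordiv (-(horse_number - single)) 2))
    else "8"
  else
    let triple := field_size - 16
    let doubles := max 0 (8 - triple)
    let boundary := 2 * doubles
    if horse_number ≤ boundary then PySem.Int.toStr (-(PySem.Int.floordiv (-horse_number) 2))
    else if horse_number ≤ boundary + 3 * triple then
      PySem.Int.toStr (doubles + -(PySem.Int.floordiv (-(horse_number - boundary)) 3))
    else "8"

-- ===== PRECONDITION & SPEC =====
def Spec_compute_draw (field_size : Int) (horse_number : Int) (out : String) : Prop := out = compute_draw_alt field_size horse_number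
instance (field_size : Int) (horse_number : Int) (out : String) : Decidable (Spec_compute_draw field_size horse_number out) := by unfold Spec_compute_draw; infer_instance

-- ===== CLAIM (what is proved, stated in full; the proofs are below) =====
def Claim_equal_compute_draw : Prop := ∀ (field_size : Int) (horse_number : Int), Dom_compute_draw field_size horse_number → Spec_compute_draw field_size horse_number (compute_draw field_size horse_number)

-- ===== LEMMAS AND PROOFS =====

-- A's loop over a block of n brackets of size 1, characterised in closed form
lemma loop1_replicate (hn idx total : Int) (n : Nat) (h : total < hn) :
    computeDrawLoop hn (List.replicate n 1) idx total =
      if hn ≤ total + 1 * n then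
        some (idx + -(PySem.Int.floordiv (-(hn - total)) 1) - 1)
      else none := by
  induction n generalizing idx total with
  | zero =>
    simp only [List.replicate, computeDrawLoop, Nat.cast_zero, mul_zero, add_zero]
    rw [if_neg (by omega)]
  | succ n ih =>
    simp only [List.replicate, computeDrawLoop]
    by_cases hc : hn ≤ total + 1
    · rw [if_pos hc, if_pos (by push_cast; omega)]
      congr 1
      rw [PySem.Int.floordiv_eq_ediv_of_pos (by norm_num)]
      omega
    · rw [if_neg hc, ih (idx + 1) (total + 1) (by omega)]
      rw [PySem.Int.floordiv_eq_ediv_of_pos (by norm_num),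
          PySem.Int.floordiv_eq_ediv_of_pos (by norm_num)]
      push_cast
      split_ifs with h1 h2 h2
      · congr 1; omega
      · omega
      · omega
      · rfl

-- A's loop over a block of n brackets of size 2, characterised in closed form
lemma loop2_replicate (hn idx total : Int) (n : Nat) (h : total < hn) :
    computeDrawLoop hn (List.replicate n 2) idx total =
      if hn ≤ total + 2 * n then
        some (idx + -(PySem.Int.floordiv (-(hn - total)) 2) - 1)
      else none := by
  induction n generalizing idx total with
  | zero =>
    simp only [List.replicate, computeDrawLoop, Nat.cast_zero, mul_zero, add_zero]
    rw [if_neg (by omega)]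
  | succ n ih =>
    simp only [List.replicate, computeDrawLoop]
    by_cases hc : hn ≤ total + 2
    · rw [if_pos hc, if_pos (by push_cast; omega)]
      congr 1
      rw [PySem.Int.floordiv_eq_ediv_of_pos (by norm_num)]
      omega
    · rw [if_neg hc, ih (idx + 1) (total + 2) (by omega)]
      rw [PySem.Int.floordiv_eq_ediv_of_pos (by norm_num),
          PySem.Int.floordiv_eq_ediv_of_pos (by norm_num)]
      push_cast
      split_ifs with h1 h2 h2
      · congr 1; omega
      · omega
      · omega
      · rfl

-- A's loop over a block of n brackets of size 3, characterised in closed form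
lemma loop3_replicate (hn idx total : Int) (n : Nat) (h : total < hn) :
    computeDrawLoop hn (List.replicate n 3) idx total =
      if hn ≤ total + 3 * n then
        some (idx + -(PySem.Int.floordiv (-(hn - total)) 3) - 1)
      else none := by
  induction n generalizing idx total with
  | zero =>
    simp only [List.replicate, computeDrawLoop, Nat.cast_zero, mul_zero, add_zero]
    rw [if_neg (by omega)]
  | succ n ih =>
    simp only [List.replicate, computeDrawLoop]
    by_cases hc : hn ≤ total + 3
    · rw [if_pos hc, if_pos (by push_cast; omega)]
      congr 1
      rw [PySem.Int.floordiv_eq_ediv_of_pos (by norm_num)]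
      omega
    · rw [if_neg hc, ih (idx + 1) (total + 3) (by omega)]
      rw [PySem.Int.floordiv_eq_ediv_of_pos (by norm_num),
          PySem.Int.floordiv_eq_ediv_of_pos (by norm_num)]
      push_cast
      split_ifs with h1 h2 h2
      · congr 1; omega
      · omega
      · omega
      · rfl

-- A's loop over a concatenation of two blocks
lemma loop_append (hn idx total : Int) (l1 l2 : List Int) :
    computeDrawLoop hn (l1 ++ l2) idx total =
      match computeDrawLoop hn l1 idx total with
      | some i => some i
      | none => computeDrawLoop hn l2 (idx + l1.length) (total + l1.sum) := by
  induction l1 generalizing idx total with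
  | nil => simp [computeDrawLoop]
  | cons s t ih =>
    simp only [List.cons_append, computeDrawLoop]
    by_cases hc : hn ≤ total + s
    · rw [if_pos hc, if_pos hc]
    · rw [if_neg hc, if_neg hc, ih]
      have h1 : idx + 1 + (t.length : Int) = idx + ((s :: t).length : Int) := by
        simp; omega
      have h2 : total + s + t.sum = total + (s :: t).sum := by
        simp [List.sum_cons]; ring
      rw [h1, h2]

-- ===== VERDICT (by name: the statement is the Claim_ definition above) =====
theorem compute_draw_spec : Claim_equal_compute_draw := by
  intro fs hn _
  unfold Spec_compute_draw compute_draw compute_draw_alt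
  dsimp only
  by_cases h0 : fs ≤ 0 ∨ hn ≤ 0
  · rw [if_pos h0, if_pos h0]
  · rw [if_neg h0, if_neg h0]
    by_cases h8 : fs ≤ 8
    · rw [if_pos h8, if_pos h8]
    · rw [if_neg h8, if_neg h8]
      by_cases h16 : fs ≤ 16
      · -- 9..16 horses: a block of single brackets then a block of double brackets
        rw [if_pos h16, if_pos h16,
          loop_append, loop1_replicate hn 1 0 _ (by omega)]
        simp only [List.length_replicate, List.sum_replicate, nsmul_eq_mul]
        by_cases hA : hn ≤ 0 + 1 * ((16 - fs).toNat : Int)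
        · rw [if_pos hA]
          dsimp only
          rw [if_pos (show hn ≤ 16 - fs by omega)]
          congr 1
          rw [PySem.Int.floordiv_eq_ediv_of_pos (by norm_num)]
          omega
        · rw [if_neg hA]
          dsimp only
          rw [loop2_replicate hn (1 + ((16 - fs).toNat : Int))
            (0 + ((16 - fs).toNat : Int) * 1) ((8 - (16 - fs)).toNat) (by omega)]
          by_cases hB : hn ≤ 0 + ((16 - fs).toNat : Int) * 1 + 2 * (((8 - (16 - fs)).toNat : Int))
          · rw [if_pos hB]
            dsimp only
            rw [if_neg (show ¬ hn ≤ 16 - fs by omega), if_pos (show hn ≤ fs by omega)]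
            congr 1
            rw [PySem.Int.floordiv_eq_ediv_of_pos (by norm_num),
              PySem.Int.floordiv_eq_ediv_of_pos (by norm_num)]
            omega
          · rw [if_neg hB]
            dsimp only
            rw [if_neg (show ¬ hn ≤ 16 - fs by omega),
              if_neg (show ¬ hn ≤ fs by omega),
              show min (8:Int) hn = 8 by omega]
            decide
      · -- 17 or more horses: a block of double brackets then a block of triple brackets
        rw [if_neg h16, if_neg h16,
          loop_append, loop2_replicate hn 1 0 _ (by omega)]
        simp only [List.length_replicate, List.sum_replicate, nsmul_eq_mul]
        by_cases hA : hn ≤ 0 + 2 * ((8 - (fs - 16)).toNat : Int)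
        · rw [if_pos hA]
          dsimp only
          rw [if_pos (show hn ≤ 2 * max 0 (8 - (fs - 16)) by omega)]
          congr 1
          rw [PySem.Int.floordiv_eq_ediv_of_pos (by norm_num),
            PySem.Int.floordiv_eq_ediv_of_pos (by norm_num)]
          omega
        · rw [if_neg hA]
          dsimp only
          rw [loop3_replicate hn (1 + ((8 - (fs - 16)).toNat : Int))
            (0 + ((8 - (fs - 16)).toNat : Int) * 2) ((fs - 16).toNat) (by omega)]
          by_cases hB : hn ≤ 0 + ((8 - (fs - 16)).toNat : Int) * 2 + 3 * (((fs - 16).toNat : Int))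
          · rw [if_pos hB]
            dsimp only
            rw [if_neg (show ¬ hn ≤ 2 * max 0 (8 - (fs - 16)) by omega),
              if_pos (show hn ≤ 2 * max 0 (8 - (fs - 16)) + 3 * (fs - 16) by omega)]
            congr 1
            rw [PySem.Int.floordiv_eq_ediv_of_pos (by norm_num),
              PySem.Int.floordiv_eq_ediv_of_pos (by norm_num)]
            omega
          · rw [if_neg hB]
            dsimp only
            rw [if_neg (show ¬ hn ≤ 2 * max 0 (8 - (fs - 16)) by omega),
              if_neg (show ¬ hn ≤ 2 * max 0 (8 - (fs - 16)) + 3 * (fs - 16) by omega),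
              show min (8:Int) hn = 8 by omega]
            decide
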